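-- pv_equiv track=rewrite | github.com/Formal-Methods-Group/metta-morph | autoquote.py | quote_symbols_outside_strings
-- ===== SOURCE A (Python) =====
-- def quote_symbols_outside_strings(text, symbols_to_quote):
--     """Quote symbols in text, but only outside of string literals."""
--     result = []
--     current_token = []
--     in_string = False
--     escaped = False
--
--     i = 0
--     while i < len(text):
--         char = text[i]
--
--         if escaped:
--             result.append(char)
--             escaped = False
--             i += 1
--             continue
--
--         if char == '\\' and in_string:
--             result.append(char)
--             escaped = True
--             i += 1
--             continue
--
--         if char == '"':
--             # Flush current token if any
--             if current_token:
--                 token = ''.join(current_token)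
--                 if token in symbols_to_quote and not in_string:
--                     result.append("'" + token)
--                 else:
--                     result.append(token)
--                 current_token = []
--             result.append(char)
--             in_string = not in_string
--             i += 1
--             continue
--
--         if in_string:
--             # Inside string, just copy characters
--             result.append(char)
--             i += 1
--             continue
--
--         if char in ' ()\n\t':
--             # Delimiter found, flush current token
--             if current_token:
--                 token = ''.join(current_token)
--                 if token in symbols_to_quote:
--                     result.append("'" + token)
--                 else:
--                     result.append(token)
--                 current_token = []
--             result.append(char)
--             i += 1
--         else:
--             # Build up current token
--             current_token.append(char)
--             i += 1
--
--     # Flush any remaining token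
--     if current_token:
--         token = ''.join(current_token)
--         if token in symbols_to_quote and not in_string:
--             result.append("'" + token)
--         else:
--             result.append(token)
--
--     return ''.join(result)
-- ===== SOURCE B (Python) =====
-- def _q(tok, symbols_to_quote):
--     return "'" + tok if tok and tok in symbols_to_quote else tok
--
--
-- def _quote_plain(seg, symbols_to_quote):
--     """Quote symbols in a segment known to contain no string literal."""
--     pieces = []
--     tok = []
--     for c in seg:
--         if c in ' ()\n\t':
--             pieces.append(_q(''.join(tok), symbols_to_quote))
--             pieces.append(c)
--             tok = []
--         else:
--             tok.append(c)
--     pieces.append(_q(''.join(tok), symbols_to_quote))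
--     return ''.join(pieces)
--
--
-- def quote_symbols_outside_strings(text, symbols_to_quote):
--     """Quote symbols in text, but only outside of string literals."""
--     out = []
--     i, n = 0, len(text)
--     while i < n:
--         if text[i] == '"':
--             # copy the whole string literal (with escapes) verbatim
--             j = i + 1
--             while j < n and text[j] != '"':
--                 j += 2 if text[j] == '\\' else 1
--             j = min(j + 1, n)
--             out.append(text[i:j])
--             i = j
--         else:
--             # plain segment up to the next quote: quote its tokens
--             j = i
--             while j < n and text[j] != '"':
--                 j += 1
--             out.append(_quote_plain(text[i:j], symbols_to_quote))
--             i = j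
--     return ''.join(out)
-- ===== Notes on version B (the rewrite author's own statement) =====
-- stated objective: simpler
-- what changed: A's single character-by-character loop with five pieces of mutable state (in_string, escaped, current_token, result) is replaced by a two-phase decomposition: first split the text into string-literal segments (copied verbatim, escapes handled by a local two-char skip) and plain segments, then tokenise each plain segment on delimiters and quote matching tokens.
import Mathlib
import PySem

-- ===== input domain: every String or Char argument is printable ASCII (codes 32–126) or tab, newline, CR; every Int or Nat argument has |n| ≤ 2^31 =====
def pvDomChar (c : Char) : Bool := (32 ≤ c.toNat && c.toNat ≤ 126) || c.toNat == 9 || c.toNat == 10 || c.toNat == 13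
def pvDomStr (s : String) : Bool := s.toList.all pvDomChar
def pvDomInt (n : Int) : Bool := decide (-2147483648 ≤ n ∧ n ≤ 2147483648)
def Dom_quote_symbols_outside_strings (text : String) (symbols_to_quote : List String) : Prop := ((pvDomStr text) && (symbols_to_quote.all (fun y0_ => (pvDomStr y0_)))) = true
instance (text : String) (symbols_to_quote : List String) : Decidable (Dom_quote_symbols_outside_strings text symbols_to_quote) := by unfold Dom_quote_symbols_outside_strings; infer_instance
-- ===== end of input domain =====

-- B replaces A's single five-state character loop by a two-phase decomposition: split the text
-- into string-literal segments (copied verbatim) and plain segments (tokenised on delimiters and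
-- quoted); objective: simpler. Equality of return values is proved for all inputs.

-- ===== PORT A =====
-- literal transliteration of A's while-loop: state = (in_string, escaped, current_token, result)
def pvGoA (symbols : List String) : List Char → Bool → Bool → List Char → List Char → List Char
  | [], in_string, _escaped, tok, res =>
      res ++ (if tok ≠ [] then (if String.mk tok ∈ symbols ∧ in_string = false then '\'' :: tok else tok) else [])
  | c :: rest, in_string, escaped, tok, res =>
      if escaped = true then pvGoA symbols rest in_string false tok (res ++ [c])
      else if c = '\\' ∧ in_string = true then pvGoA symbols rest in_string true tok (res ++ [c])
      else if c = '"' then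
        pvGoA symbols rest (!in_string) escaped []
          (res ++ (if tok ≠ [] then (if String.mk tok ∈ symbols ∧ in_string = false then '\'' :: tok else tok) else []) ++ [c])
      else if in_string = true then pvGoA symbols rest in_string escaped tok (res ++ [c])
      else if c = ' ' ∨ c = '(' ∨ c = ')' ∨ c = '\n' ∨ c = '\t' then
        pvGoA symbols rest in_string escaped []
          (res ++ (if tok ≠ [] then (if String.mk tok ∈ symbols then '\'' :: tok else tok) else []) ++ [c])
      else pvGoA symbols rest in_string escaped (tok ++ [c]) res

def quote_symbols_outside_strings (text : String) (symbols_to_quote : List String) : String :=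
  String.mk (pvGoA symbols_to_quote text.toList false false [] [])

-- ===== PORT B =====
-- Source B's inner literal scan (after an opening quote): returns (segment incl. closing quote, rest)
def pvLit : List Char → List Char × List Char
  | [] => ([], [])
  | c :: rest =>
      if c = '"' then ([c], rest)
      else if c = '\\' then
        match rest with
        | [] => ([c], [])
        | d :: rest' => let p := pvLit rest'; (c :: d :: p.1, p.2)
      else let p := pvLit rest; (c :: p.1, p.2)

-- needed by pvGoB's termination proof
theorem pvLit_snd_len : ∀ cs : List Char, (pvLit cs).2.length ≤ cs.length := by
  intro cs
  induction cs using pvLit.induct with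
  | case1 => rw [pvLit.eq_def]
  | case2 rest' => rw [pvLit.eq_def]; simp
  | case3 h => rw [pvLit.eq_def]; simp
  | case4 d rest' h ih => rw [pvLit.eq_def]; simp; omega
  | case5 d rest' h1 h2 ih => rw [pvLit.eq_def]; simp [h1, h2]; omega

-- Source B's _q
def pvQ (tok : List Char) (symbols : List String) : List Char :=
  if tok ≠ [] ∧ String.mk tok ∈ symbols then '\'' :: tok else tok

-- Source B's _quote_plain loop (pieces/tok accumulation, emitted in order)
def pvQP (symbols : List String) : List Char → List Char → List Char
  | [], tok => pvQ tok symbols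
  | c :: rest, tok =>
      if c = ' ' ∨ c = '(' ∨ c = ')' ∨ c = '\n' ∨ c = '\t'
      then pvQ tok symbols ++ c :: pvQP symbols rest []
      else pvQP symbols rest (tok ++ [c])

-- Source B's outer loop: alternate literal segments (verbatim) and plain segments (quoted)
def pvGoB (symbols : List String) : List Char → List Char
  | [] => []
  | c :: rest =>
      if c = '"' then
        c :: (pvLit rest).1 ++ pvGoB symbols (pvLit rest).2
      else
        pvQP symbols ((c :: rest).takeWhile (· ≠ '"')) [] ++
          pvGoB symbols ((c :: rest).dropWhile (· ≠ '"'))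
  termination_by cs => cs.length
  decreasing_by
  · have := pvLit_snd_len rest; simp; omega
  · simp only [List.dropWhile]
    have hc : (decide (c ≠ '"')) = true := by simpa using ‹¬ c = '"'›
    rw [hc]
    have := List.length_dropWhile_le (fun x => decide (x ≠ '"')) rest
    simp at this ⊢; omega

def quote_symbols_outside_strings_alt (text : String) (symbols_to_quote : List String) : String :=
  String.mk (pvGoB symbols_to_quote text.toList)

-- ===== PRECONDITION & SPEC =====
def Spec_quote_symbols_outside_strings (text : String) (symbols_to_quote : List String) (out : String) : Prop := out = quote_symbols_outside_strings_alt text symbols_to_quote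
instance (text : String) (symbols_to_quote : List String) (out : String) : Decidable (Spec_quote_symbols_outside_strings text symbols_to_quote out) := by unfold Spec_quote_symbols_outside_strings; infer_instance

-- ===== CLAIM (what is proved, stated in full; the proofs are below) =====
def Claim_equal_quote_symbols_outside_strings : Prop := ∀ (text : String) (symbols_to_quote : List String), Dom_quote_symbols_outside_strings text symbols_to_quote → Spec_quote_symbols_outside_strings text symbols_to_quote (quote_symbols_outside_strings text symbols_to_quote)

-- ===== LEMMAS AND PROOFS =====

-- accumulator lemma for A's loop
theorem pvGoA_acc (symbols : List String) :
    ∀ (cs : List Char) (ins esc : Bool) (tok res : List Char),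
      pvGoA symbols cs ins esc tok res = res ++ pvGoA symbols cs ins esc tok [] := by
  intro cs
  induction cs with
  | nil => intro ins esc tok res; simp [pvGoA]
  | cons c rest ih =>
    intro ins esc tok res
    simp only [pvGoA]
    split_ifs <;>
      (conv_lhs => rw [ih]) <;>
      (conv_rhs => rw [ih]) <;>
      simp

-- inside a string A copies the literal segment verbatim, like pvLit
theorem pvGoA_in (symbols : List String) :
    ∀ cs : List Char,
      pvGoA symbols cs true false [] [] =
        (pvLit cs).1 ++ pvGoA symbols (pvLit cs).2 false false [] [] := by
  intro cs
  induction cs using pvLit.induct with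
  | case1 => simp [pvGoA, pvLit]
  | case2 rest' =>
    rw [pvLit.eq_def]
    simp only [pvGoA]
    simp
    rw [pvGoA_acc symbols rest' false false [] ['"']]
    simp
  | case3 h =>
    rw [pvLit.eq_def]
    simp [pvGoA]
  | case4 d rest' h ih =>
    rw [pvLit.eq_def]
    simp only [pvGoA]
    simp
    rw [pvGoA_acc symbols rest' true false [] ['\\', d], ih]
    simp
  | case5 d rest' h1 h2 ih =>
    rw [pvLit.eq_def]
    simp only [pvGoA]
    simp [h1, h2]
    rw [pvGoA_acc symbols rest' true false [] [d], ih]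
    simp

-- bridging form of the out-of-string processing: a pending token + the rest of the text
def pvG (symbols : List String) : List Char → List Char → List Char
  | [], tok => pvQ tok symbols
  | c :: rest, tok =>
      if c = '"' then pvQ tok symbols ++ c :: (pvLit rest).1 ++ pvG symbols (pvLit rest).2 []
      else if c = ' ' ∨ c = '(' ∨ c = ')' ∨ c = '\n' ∨ c = '\t'
      then pvQ tok symbols ++ c :: pvG symbols rest []
      else pvG symbols rest (tok ++ [c])
  termination_by cs _ => cs.length
  decreasing_by
  · have := pvLit_snd_len rest; simp; omega
  · simp
  · simp

theorem pvGoA_out (symbols : List String) :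
    ∀ (cs tok : List Char),
      pvGoA symbols cs false false tok [] = pvG symbols cs tok := by
  intro cs tok
  induction cs, tok using pvG.induct with
  | case1 tok => simp [pvGoA, pvG, pvQ]; split_ifs <;> simp_all
  | case2 rest tok ih =>
    conv_rhs => rw [pvG.eq_def]
    simp only [pvGoA]
    simp
    rw [pvGoA_acc, pvGoA_in, ih]
    simp [pvQ]
    split_ifs <;> simp_all
  | case3 c rest tok h1 h2 ih =>
    conv_rhs => rw [pvG.eq_def]
    simp only [pvGoA]
    simp [h1, h2]
    rw [pvGoA_acc, ih]
    simp [pvQ]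
    split_ifs <;> simp_all
  | case4 c rest tok h1 h2 ih =>
    conv_rhs => rw [pvG.eq_def]
    simp only [pvGoA]
    simp [h1, h2]
    exact ih

-- one unfolding step of pvGoB (valid whatever the head is)
theorem pvGoB_unfold (symbols : List String) :
    ∀ cs : List Char,
      pvQP symbols (cs.takeWhile (· ≠ '"')) [] ++ pvGoB symbols (cs.dropWhile (· ≠ '"')) =
        pvGoB symbols cs := by
  intro cs
  cases cs with
  | nil => simp [pvQP, pvQ, pvGoB]
  | cons c rest =>
    by_cases h : c = '"'
    · subst h; simp [List.takeWhile, List.dropWhile, pvQP, pvQ]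
    · rw [show pvGoB symbols (c :: rest) =
            pvQP symbols ((c :: rest).takeWhile (· ≠ '"')) [] ++
              pvGoB symbols ((c :: rest).dropWhile (· ≠ '"'))
          from by rw [pvGoB.eq_def]; simp [h]]

theorem pvG_eq_B (symbols : List String) :
    ∀ (cs tok : List Char),
      pvG symbols cs tok =
        pvQP symbols (cs.takeWhile (· ≠ '"')) tok ++ pvGoB symbols (cs.dropWhile (· ≠ '"')) := by
  intro cs tok
  induction cs, tok using pvG.induct with
  | case1 tok => simp [pvG, pvQP, pvGoB]
  | case2 rest tok ih =>
    rw [pvG.eq_def]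
    simp only [List.takeWhile, List.dropWhile]
    simp [pvQP]
    rw [ih, pvGoB_unfold]
    conv_rhs => rw [pvGoB.eq_def]
    simp
  | case3 c rest tok h1 h2 ih =>
    rw [pvG.eq_def]
    simp [h1, h2, pvQP]
    rw [ih]
    simp
  | case4 c rest tok h1 h2 ih =>
    rw [pvG.eq_def]
    simp [h1, h2, pvQP]
    rw [ih]
    simp

-- ===== VERDICT (by name: the statement is the Claim_ definition above) =====
theorem quote_symbols_outside_strings_spec : Claim_equal_quote_symbols_outside_strings := by
  intro text symbols _
  unfold Spec_quote_symbols_outside_strings quote_symbols_outside_strings quote_symbols_outside_strings_alt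
  rw [pvGoA_out, pvG_eq_B, pvGoB_unfold]
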